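/- GENERATED by farm/worked/mk_tree_copies.py from farm/worked/get_bits/Proof.lean (a worked proof of the farm's unit `get_bits`,
   accepted by the verdict) — do not edit. -/
import Asan.CheckWalk
import Vorbis.Spec.ReaderLemmas
import Vorbis.Spec.Units.get_bits

open X86 X86.User Asan Vorbis

set_option maxRecDepth 4000
set_option maxHeartbeats 4000000

/-- `get_bits(f, n)` satisfies its contract for every `n ≤ 32` (STAGE 2; the hypothesis `h_gb` is the stage-1 contract `spec24` at
the function's own entry). `n ≤ 24`: the stage-1 contract at the same entry state (`GetBits.reuse_at`; the walker does not apply a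
`Calls` hypothesis whose entry is the function's own). `25 ≤ n ≤ 32`: the walk of `get_bits(f, 24) ; get_bits(f, n - 24)`, both
recursive calls through `Calls.use` with the stage-1 contract, the two posts combined by `GetBitsPost.combine`. -/
theorem Vorbis.Spec.Worked.get_bits_ok : Vorbis.Spec.get_bits.Statement := by
  intro Lay hLay μ hμ u₀ hcode hload4 hstore4 h_raw h_gb others frames Blk len u ret he hpre
  have hgb := h_gb others frames Blk len
  obtain ⟨hpre, hn32⟩ := hpre
  by_cases hn24 : Vorbis.Spec.bitsArg u ≤ 24
  · -- n ≤ 24: the stage-1 contract at the same entry state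
    exact Vorbis.Spec.GetBits.reuse_at hgb he (show 304 ≤ 352 by decide) ⟨hpre, hn24⟩ (fun v hv => hv) rfl
  · -- 25 ≤ n ≤ 32: the walk
    v_entry he
    have hsp := hpre.shadow.rsp
    have hwhere := hpre.where_obj
    obtain ⟨f, hf⟩ : ∃ f : Nat, (u.reg .rdi).toNat = f := ⟨_, rfl⟩
    have hr : u.reg .rdi = addr f := eq_addr _ _ hf
    have hbits : Bits Blk len u.mem f := hf ▸ hpre.bits
    have hL : BlkLive Blk (Live (stackObjs frames ++ others)) := hpre.env.live
    have hobr := hbits.OBR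
    simp only [voff] at hobr
    have hV1 := hbits.V1
    rw [Vorbis.Spec.bitsArg_def] at hn24 hn32
    -- the two values the branches test: `n` (esi) and `valid_bits`
    have r1768 : u.mem.readLE (addr f + 1768) 4 = u.mem.u32 (f + 1768) := by
      simp only [vfield]
    have hvb : stb_vorbis.valid_bits u.mem f = u.mem.i32 (f + 1768) := by
      simp only [vacc, voff]
    have hvbc := u.mem.i32_cases (f + 1768)
    have hvblt := u.mem.u32_lt (f + 1768)
    have hti : (BitVec.ofNat 32 (u.mem.u32 (f + 1768))).toInt = stb_vorbis.valid_bits u.mem f := by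
      rw [hvb, Mem.i32_def, toInt_ofNat32 _ hvblt]
    have hn := Vorbis.Spec.GetBits.part32_toInt (u.reg .rsi)
    have hpn := Asan.part32_toNat (u.reg .rsi)
    have hjg : (24#32).toInt < (Word.part Width.w32 (u.reg Reg.rsi)).toInt := by
      have e : (24#32).toInt = 24 := by decide
      rw [e]
      omega
    u_walk hcode [hμ.vendor] until [Vorbis.L.get_bits.loop1, Vorbis.L.get_bits.entry] span [Vorbis.L.textLo, Vorbis.L.textHi] side (v_side)
    · -- 0x10d1d7, load4 [f + 0x6e8] (`f->valid_bits`)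
      have hun : ShadowUntouched u.mem s_10d1d7.mem := by v_untouched
      have hs := hbits.site_field hL 1768 4 (by omega) (by omega) rfl
      exact Vorbis.Spec.check_site hpre.shadow.inv hun hs (by u_omega)
    · -- 0x10d2b3, load4 [f + 0x6e4] (`f->acc`)
      have hun : ShadowUntouched u.mem s_10d2b3.mem := by v_untouched
      have hs := hbits.site_field hL 1764 4 (by omega) (by omega) rfl
      exact Vorbis.Spec.check_site hpre.shadow.inv hun hs (by u_omega)
    · -- `valid_bits < 0`: return 0, nothing of `*f` written
      refine ReachVia.done ?_
      v_returned
      have hE : Mem.EqOn f (f + 1808) u.mem s_10d2ee.mem := by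
        u_memnorm
        u_eqon
      refine ⟨by v_untouched, ?_⟩
      rw [hf, w_rax]
      have e0 : (Word.ofBV 0#32).toNat = 0 := by decide
      rw [e0]
      apply Vorbis.Spec.GetBits.post_eop _ hbits hE
      rw [Vorbis.Spec.GetBits.msb_ofNat32 _ hvblt] at hbr_10d1e4
      have hge : 2 ^ 31 ≤ u.mem.u32 (f + 1768) := of_decide_eq_true hbr_10d1e4
      omega
    · -- `valid_bits ≥ n`: the extraction
      refine ReachVia.done ?_
      -- (`v_returned` a second time: its named holes clash, so the fields by hand)
      refine X86.User.Returned.mk w_rip w_rsp (by u_saved) ?_ (Vorbis.conv_code_in w_eq) ?_ ?_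
      · simp only [X86.User.Spec.footprint, vspec]
        u_same
      · -- (`v_inv`'s bare `assumption` costs a minute in this context: the two halves by name)
        show X86.User.abiInv _
        refine Vorbis.abiInv_of ?_ ?_
        · rw [w_flags]
          simp only [X86.User.df_setStatus]
          exact w_df_10d2b3
        · rw [w_mxcsr]
          exact he_mx
      refine ⟨by v_untouched, ?_⟩
      rw [hf, w_rax, w_mem, Vorbis.Spec.bitsArg_def]
      simp only [vfield]
      have hle : (Word.part Width.w32 (u.reg Reg.rsi)).toInt ≤ stb_vorbis.valid_bits u.mem f := by
        rw [← hti]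
        exact hbr_10d1ed
      refine Vorbis.Spec.GetBits.post_take hbits ?_ _ _ (by omega) (by omega) ?_ ?_
      · u_eqon
      · rw [Vorbis.Spec.GetBits.sub_toInt _ _ (by omega) (by omega), hpn]
        omega
      · constructor
        · rw [Vorbis.Spec.GetBits.ofBV32_toNat]
          exact BitVec.isLt _
        · intro h31
          have ec : (BitVec.setWidth 8 (Word.part Width.w32 (u.reg Reg.rsi))).toNat % 32 =
              (u.reg Reg.rsi).toNat % 2 ^ 32 := by
            rw [BitVec.toNat_setWidth, hpn]
            omega
          rw [Vorbis.Spec.GetBits.ofBV32_toNat, ec]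
          exact mask_and_lt _ _ (by omega)
    · -- `0 ≤ valid_bits < n`, `24 < n`: the recursive arm. 0x10d274: `call get_bits` with esi = 24 (the walker takes the
      -- function's own entry for a back edge: the contract is applied by hand)
      have hun1 : ShadowUntouched u.mem s_10d274.mem := by v_untouched
      -- the saved registers and the return address on the stack
      have b1 : UInt64.ofNat (s_10d274.mem.readLE (u.reg .rsp - 8) 8) = u.reg .r13 := by u_resolve
      have b2 : UInt64.ofNat (s_10d274.mem.readLE (u.reg .rsp - 16) 8) = u.reg .r12 := by u_resolve
      have b3 : UInt64.ofNat (s_10d274.mem.readLE (u.reg .rsp - 24) 8) = u.reg .rbp := by u_resolve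
      have b4 : UInt64.ofNat (s_10d274.mem.readLE (u.reg .rsp - 32) 8) = u.reg .rbx := by u_resolve
      have b0 : UInt64.ofNat (s_10d274.mem.readLE (u.reg .rsp) 8) = ret := by u_resolve
      have haf : (addr f).toNat = f := toNat_addr f (by omega)
      have hE1 : Mem.EqOn f (f + 1808) u.mem s_10d274.mem := by
        u_memnorm
        u_eqon
      obtain ⟨hb1, emu1, evb1⟩ := Vorbis.Spec.GetBits.obj_same hbits hE1
      have hrdi1 : s_10d274.reg .rdi = u.reg .rdi := by
        rw [w_rdi, hr]
      have hpre1 : (Vorbis.Spec.get_bits.spec24 others frames Blk len).pre s_10d274 := by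
        refine ⟨hpre.again (hpre.shadow.call hun1 (by u_omega) (by u_omega) (by u_omega)) hrdi1 ?_, ?_⟩
        · rw [hf]
          exact hb1
        · rw [Vorbis.Spec.bitsArg_def, w_rsi]
          decide
      have hent1 : AtEntry (conv u₀) Vorbis.L.get_bits.entry (Vorbis.Spec.get_bits.spec24 others frames Blk len).frame
          Vorbis.L.get_bits.ret6 s_10d274 := by
        refine ⟨w_rip, ?_, by decide, ?_, ?_, ?_, Vorbis.conv_code_in w_eq, ?_⟩
        · rw [w_rsp]
          u_resolve
        · rw [w_rsp]
          u_omega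
        · rw [w_rsp]
          v_side
        · rw [w_rsp]
          v_side
        · show X86.User.abiInv _
          refine Vorbis.abiInv_of ?_ ?_
          · rw [w_flags]
            simp only [X86.User.df_setStatus]
            exact w_df_10d1d7
          · rw [w_mxcsr]
            exact he_mx
      refine Calls.use hgb _ hent1 hpre1 ?_
      intro v1 hret1
      -- the returned state, described the way the walker does after a call
      have w1_rip : v1.rip = 1102457 := hret1.rip
      have w1_rsp : v1.reg .rsp = u.reg .rsp - 40 := by
        rw [hret1.rsp, w_rsp]
        simp only [Word.addrNorm]
      have w1_r12 : v1.reg .r12 = Word.ofBV (Word.part Width.w32 (u.reg Reg.rsi)) :=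
        (hret1.saved.get .r12 rfl).trans w_r12
      have w1_rbx : v1.reg .rbx = addr f := (hret1.saved.get .rbx rfl).trans w_rbx
      have w1_kept : RegsKept [.rsi, .rdi, .r12, .rbx, .rsp, .rax, .rcx, .rdx, .r8, .r9, .r10, .r11, .r16, .r17, .r18,
          .r19, .r20, .r21, .r22, .r23, .r24, .r25, .r26, .r27, .r28, .r29, .r30, .r31] u v1 :=
        RegsKept.trans (w_kept.mono_all (by rfl)) (hret1.saved.mono_all (by rfl))
      have w1_same := hret1.same
      simp only [X86.User.Spec.footprint, vspec] at w1_same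
      rw [w_rsp, w_rdi, w_mem] at w1_same
      have hdf1 : v1.flags .df = false := hret1.inv.1
      have hmx1 : v1.mxcsr &&& 0x1F80 = 0x1F80 := hret1.inv.2
      have h1 : GetBitsPost Blk len s_10d274.mem v1.mem f 24 (v1.reg .rax).toNat := by
        have hp := hret1.post.bits
        rw [hrdi1, hf, Vorbis.Spec.bitsArg_def, w_rsi] at hp
        exact hp
      have h1' := Vorbis.Spec.GetBits.post_of_entry_same (by omega) hE1 h1
      have hun1' : ShadowUntouched s_10d274.mem v1.mem := hret1.post.untouched
      have w1_eq : Mem.EqOn Vorbis.L.textLo Vorbis.L.textHi u₀.mem v1.mem := Vorbis.conv_code_eqOn hret1.code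
      have w_mem_10d274 := w_mem
      clear w_rip w_rsi w_rdi w_r12 w_rbx w_rsp w_rax w_kept w_mem w_flags w_mxcsr w_zmm w_eq
      u_walk hcode [hμ.vendor] until [Vorbis.L.get_bits.loop1, Vorbis.L.get_bits.entry] span [Vorbis.L.textLo, Vorbis.L.textHi] side (v_side)
      -- 0x10d283: `call get_bits` with esi = n - 24
      have hun2 : ShadowUntouched u.mem s_10d283.mem := by
        refine (hun1.trans hun1').trans ?_
        u_memnorm
        u_eqon
      have hE2 : Mem.EqOn f (f + 1808) v1.mem s_10d283.mem := by
        u_memnorm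
        u_eqon
      obtain ⟨hb2, emu2, evb2⟩ := Vorbis.Spec.GetBits.obj_same h1.bits hE2
      have hrdi2 : s_10d283.reg .rdi = u.reg .rdi := by
        rw [w_rdi, hr]
      have hn2 : Vorbis.Spec.bitsArg s_10d283 = (u.reg .rsi).toNat % 2 ^ 32 - 24 := by
        rw [Vorbis.Spec.bitsArg_def, w_rsi]
        rw [Vorbis.Spec.GetBits.ofBV32_toNat, BitVec.toNat_setWidth, UInt64.toNat_toBitVec, UInt64.toNat_sub,
          Vorbis.Spec.GetBits.ofBV32_toNat, hpn]
        have e24 : (24 : UInt64).toNat = 24 := rfl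
        rw [e24]
        omega
      have hpre2 : (Vorbis.Spec.get_bits.spec24 others frames Blk len).pre s_10d283 := by
        refine ⟨hpre.again (hpre.shadow.call hun2 (by u_omega) (by u_omega) (by u_omega)) hrdi2 ?_, ?_⟩
        · rw [hf]
          exact hb2
        · rw [hn2]
          omega
      have hent2 : AtEntry (conv u₀) Vorbis.L.get_bits.entry (Vorbis.Spec.get_bits.spec24 others frames Blk len).frame
          Vorbis.L.get_bits.ret7 s_10d283 := by
        refine ⟨w_rip, ?_, by decide, ?_, ?_, ?_, Vorbis.conv_code_in w_eq, ?_⟩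
        · rw [w_rsp]
          u_resolve
        · rw [w_rsp]
          u_omega
        · rw [w_rsp]
          v_side
        · rw [w_rsp]
          v_side
        · show X86.User.abiInv _
          refine Vorbis.abiInv_of ?_ ?_
          · rw [w_flags]
            exact hdf1
          · rw [w_mxcsr]
            exact hret1.inv.2
      refine Calls.use hgb _ hent2 hpre2 ?_
      intro v2 hret2
      have w2_rip : v2.rip = 1102472 := hret2.rip
      have w2_rsp : v2.reg .rsp = u.reg .rsp - 40 := by
        rw [hret2.rsp, w_rsp]
        simp only [Word.addrNorm]
      have w2_r12 : v2.reg .r12 = Word.ofBV (Word.part Width.w32 (u.reg Reg.rsi)) :=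
        (hret2.saved.get .r12 rfl).trans w_r12
      have w2_rbx : v2.reg .rbx = addr f := (hret2.saved.get .rbx rfl).trans w_rbx
      have w2_rbp : v2.reg .rbp = Word.ofBV (Word.part Width.w32 (v1.reg Reg.rax)) :=
        (hret2.saved.get .rbp rfl).trans w_rbp
      have w2_kept : RegsKept [.rbp, .rsi, .rdi, .r12, .rbx, .rsp, .rax, .rcx, .rdx, .r8, .r9, .r10, .r11, .r16, .r17,
          .r18, .r19, .r20, .r21, .r22, .r23, .r24, .r25, .r26, .r27, .r28, .r29, .r30, .r31] u v2 :=
        RegsKept.trans (w_kept.mono_all (by rfl)) (hret2.saved.mono_all (by rfl))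
      have w2_same := hret2.same
      simp only [X86.User.Spec.footprint, vspec] at w2_same
      rw [w_rsp, w_rdi, w_mem] at w2_same
      have hdf2 : v2.flags .df = false := hret2.inv.1
      have hmx2 : v2.mxcsr &&& 0x1F80 = 0x1F80 := hret2.inv.2
      have h2 : GetBitsPost Blk len s_10d283.mem v2.mem f ((u.reg .rsi).toNat % 2 ^ 32 - 24) (v2.reg .rax).toNat := by
        have hp := hret2.post.bits
        rw [hrdi2, hf, hn2] at hp
        exact hp
      have h2' := Vorbis.Spec.GetBits.post_of_entry_same (by omega) hE2 h2
      have hun2' : ShadowUntouched s_10d283.mem v2.mem := hret2.post.untouched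
      have w2_eq : Mem.EqOn Vorbis.L.textLo Vorbis.L.textHi u₀.mem v2.mem := Vorbis.conv_code_eqOn hret2.code
      have w_mem_10d283 := w_mem
      clear w_rip w_rsi w_rdi w_r12 w_rbx w_rbp w_rsp w_kept w_mem w_flags w_mxcsr w_eq
      -- the saved registers and the return address, read through the two calls
      rw [w_mem_10d274] at b1 b2 b3 b4 b0
      have hst : Mem.EqOn ((u.reg .rsp).toNat - 32) ((u.reg .rsp).toNat + 8) s_10d274.mem v2.mem := by
        rw [w_mem_10d274]
        u_eqon
      rw [w_mem_10d274] at hst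
      have e8 : (u.reg .rsp - 8).toNat = (u.reg .rsp).toNat - 8 := by u_omega
      have e16 : (u.reg .rsp - 16).toNat = (u.reg .rsp).toNat - 16 := by u_omega
      have e24 : (u.reg .rsp - 24).toNat = (u.reg .rsp).toNat - 24 := by u_omega
      have e32 : (u.reg .rsp - 32).toNat = (u.reg .rsp).toNat - 32 := by u_omega
      have hs1 : UInt64.ofNat (v2.mem.readLE (u.reg .rsp - 8) 8) = u.reg .r13 :=
        Mem.ofNat_readLE_frame b1 (hst.mono (by omega) (by omega)) (by omega)
      have hs2 : UInt64.ofNat (v2.mem.readLE (u.reg .rsp - 16) 8) = u.reg .r12 :=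
        Mem.ofNat_readLE_frame b2 (hst.mono (by omega) (by omega)) (by omega)
      have hs3 : UInt64.ofNat (v2.mem.readLE (u.reg .rsp - 24) 8) = u.reg .rbp :=
        Mem.ofNat_readLE_frame b3 (hst.mono (by omega) (by omega)) (by omega)
      have hs4 : UInt64.ofNat (v2.mem.readLE (u.reg .rsp - 32) 8) = u.reg .rbx :=
        Mem.ofNat_readLE_frame b4 (hst.mono (by omega) (by omega)) (by omega)
      have hs0 : UInt64.ofNat (v2.mem.readLE (u.reg .rsp) 8) = ret :=
        Mem.ofNat_readLE_frame b0 (hst.mono (by omega) (by omega)) (by omega)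
      clear hst e8 e16 e24 e32
      clear b1 b2 b3 b4 b0
      u_walk hcode [hμ.vendor] until [Vorbis.L.get_bits.loop1, Vorbis.L.get_bits.entry] span [Vorbis.L.textLo, Vorbis.L.textHi] side (v_side)
      -- the state after the `ret`
      refine ReachVia.done ?_
      refine X86.User.Returned.mk w_rip w_rsp (by u_saved) ?_ (Vorbis.conv_code_in w_eq) ?_ ?_
      · -- the footprint: the function's stores and the two callees' footprints (`u_same` has no step for a callee)
        simp only [X86.User.Spec.footprint, vspec]
        rw [w_mem, hr]
        have hw1 : (u.reg .rsp).toNat - 352 ≤ (u.reg .rsp - 48).toNat - 304 := by u_omega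
        have hw2 : (u.reg .rsp - 48).toNat ≤ (u.reg .rsp).toNat := by u_omega
        refine Mem.SameExcept.step_same ?_ w2_same (Vorbis.Spec.GetBits.spans_sub _ _ _ hw1 hw2)
        refine Mem.SameExcept.step_writeLE' _ _ _ ?_ ?_ ?_
        rotate_left
        · u_frame_side
        · u_same_side
        refine Mem.SameExcept.step_same ?_ w1_same (Vorbis.Spec.GetBits.spans_sub _ _ _ hw1 hw2)
        u_same_core
      · show X86.User.abiInv _
        refine Vorbis.abiInv_of ?_ ?_
        · rw [w_flags]
          simp only [X86.User.df_setStatus]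
          exact hdf2
        · rw [w_mxcsr]
          exact hmx2
      · -- the postcondition: the two stage-1 posts combined
        have hvb0 : 0 ≤ stb_vorbis.valid_bits u.mem f := by
          rw [Vorbis.Spec.GetBits.msb_ofNat32 _ hvblt] at hbr_10d1e4
          have hlt : ¬ 2 ^ 31 ≤ u.mem.u32 (f + 1768) := of_decide_eq_false hbr_10d1e4
          omega
        refine ⟨?_, ?_⟩
        · rw [w_mem]
          exact hun2.trans hun2'
        · rw [hf, w_rax, w_mem, Vorbis.Spec.bitsArg_def,
            Vorbis.Spec.GetBits.combine_toNat _ _ h1.result.1 h2.result.1, get_bits_combine_machine]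
          exact GetBitsPost.combine h1' h2' (by omega) hvb0
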